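-- pv_equiv track=rewrite | github.com/direvus/headline | decimate.py | decimate
-- ===== SOURCE A (Python) =====
-- def decimate(sequence, step):
--     result = []
--     i = 0
--     length = len(sequence)
--     for _ in range(length):
--         result.append(sequence[i])
--         i = (i + step) % length
--     return result
-- ===== SOURCE B (Python) =====
-- def _gcd(a, b):
--     while b:
--         a, b = b, a % b
--     return a
--
--
-- def decimate(sequence, step):
--     # Number-theoretic decomposition: the visited indices repeat with period
--     # n // gcd(step % n, n), so build one period (wrap by subtraction, no mod
--     # in the loop) and tile it gcd times.
--     n = len(sequence)
--     if n == 0: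
--         return []
--     s = step % n
--     g = _gcd(s, n)
--     cycle = []
--     i = 0
--     for _ in range(n // g):
--         cycle.append(sequence[i])
--         i += s
--         if i >= n:
--             i -= n
--     return cycle * g
-- ===== Notes on version B (the rewrite author's own statement) =====
-- stated objective: alternative
-- what changed: B uses a number-theoretic decomposition: the visited indices are periodic with period n // gcd(step % n, n), so it computes gcd with a hand-written Euclid loop, walks only one period (wrapping by conditional subtraction instead of %), and tiles that cycle gcd times by list repetition, instead of A's n-iteration modular-accumulator walk.
import Mathlib
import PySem

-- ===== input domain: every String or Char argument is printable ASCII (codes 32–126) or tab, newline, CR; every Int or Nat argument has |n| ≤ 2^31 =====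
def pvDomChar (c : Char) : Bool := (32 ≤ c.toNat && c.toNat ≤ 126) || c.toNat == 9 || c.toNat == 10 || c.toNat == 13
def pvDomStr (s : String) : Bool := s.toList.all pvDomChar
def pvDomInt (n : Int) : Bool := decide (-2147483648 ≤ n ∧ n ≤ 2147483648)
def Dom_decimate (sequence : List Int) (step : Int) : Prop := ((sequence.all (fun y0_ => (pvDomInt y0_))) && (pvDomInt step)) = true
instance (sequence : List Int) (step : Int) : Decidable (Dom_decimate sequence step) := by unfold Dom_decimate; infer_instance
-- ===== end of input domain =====

-- B replaces A's n-step modular walk by a number-theoretic decomposition: build one period of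
-- length n // gcd(step % n, n) (wrapping by subtraction) and tile it gcd times (same cost, alternative algorithm).

-- ===== PORT A =====
-- loop state: (result, i); each iteration appends sequence[i] and sets i = (i + step) % length
def decimate (sequence : List Int) (step : Int) : List Int :=
  ((List.range sequence.length).foldl
    (fun (st : List Int × Int) _ =>
      (st.1 ++ [PySem.List.pyGetD sequence st.2 0],
       PySem.Int.mod (st.2 + step) (sequence.length : Int)))
    ([], 0)).1

-- ===== PORT B =====
-- _gcd(a, b): while b: a, b = b, a % b; return a   (called with a ≥ 0, b > 0)
def pyGcd (a b : Int) : Int :=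
  if _h : b = 0 then a else pyGcd b (PySem.Int.mod a b)
termination_by b.natAbs
decreasing_by
  rcases lt_or_gt_of_ne _h with hb | hb
  · have := PySem.Int.mod_neg_bounds a hb
    omega
  · have h1 := PySem.Int.mod_nonneg a hb
    have h2 := PySem.Int.mod_lt a hb
    omega

def decimate_alt (sequence : List Int) (step : Int) : List Int :=
  if sequence.length = 0 then []
  else
    -- s = step % n; g = _gcd(s, n)
    let s := PySem.Int.mod step (sequence.length : Int)
    let g := pyGcd s (sequence.length : Int)
    -- one period: for _ in range(n // g): cycle.append(sequence[i]); i += s; if i >= n: i -= n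
    PySem.List.pyRepeat
      (((List.range (PySem.Int.floordiv (sequence.length : Int) g).toNat).foldl
        (fun (st : List Int × Int) _ =>
          (st.1 ++ [PySem.List.pyGetD sequence st.2 0],
           if st.2 + s ≥ (sequence.length : Int) then st.2 + s - (sequence.length : Int)
           else st.2 + s))
        ([], 0)).1)
      g    -- cycle * g

-- ===== PRECONDITION & SPEC =====
def Spec_decimate (sequence : List Int) (step : Int) (out : List Int) : Prop := out = decimate_alt sequence step
instance (sequence : List Int) (step : Int) (out : List Int) : Decidable (Spec_decimate sequence step out) := by unfold Spec_decimate; infer_instance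

-- ===== CLAIM (what is proved, stated in full; the proofs are below) =====
def Claim_equal_decimate : Prop := ∀ (sequence : List Int) (step : Int), Dom_decimate sequence step → Spec_decimate sequence step (decimate sequence step)

-- ===== LEMMAS AND PROOFS =====

-- A's loop invariant: after k iterations the state is the closed-form prefix and i = (k*step) % n
theorem decimate_invariant (sequence : List Int) (step : Int) (hne : sequence ≠ []) (k : Nat) :
    (List.range k).foldl
      (fun (st : List Int × Int) _ =>
        (st.1 ++ [PySem.List.pyGetD sequence st.2 0],
         PySem.Int.mod (st.2 + step) (sequence.length : Int)))
      ([], 0)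
    = ((List.range k).map
         (fun (j : Nat) => PySem.List.pyGetD sequence (((j : Int) * step) % (sequence.length : Int)) 0),
       ((k : Int) * step) % (sequence.length : Int)) := by
  have hL : (0 : Int) < (sequence.length : Int) := by
    have := List.length_pos_iff.mpr hne
    exact_mod_cast this
  induction k with
  | zero => simp
  | succ k ih =>
    rw [List.range_succ, List.foldl_append, ih, List.map_append]
    simp only [List.foldl_cons, List.foldl_nil, List.map_cons, List.map_nil, Prod.mk.injEq]
    refine ⟨trivial, ?_⟩
    rw [PySem.Int.mod_eq_emod_of_pos hL]
    have h1 : ((k : Int) + 1) * step = (k : Int) * step + step := by ring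
    push_cast
    rw [h1]
    exact Int.emod_add_emod ((k : Int) * step) (sequence.length : Int) step

-- B's period loop invariant (conditional wrap = emod on the maintained range)
theorem decimate_alt_invariant (sequence : List Int) (s : Int)
    (hs0 : 0 ≤ s) (hsN : s < (sequence.length : Int)) (k : Nat) :
    (List.range k).foldl
      (fun (st : List Int × Int) _ =>
        (st.1 ++ [PySem.List.pyGetD sequence st.2 0],
         if st.2 + s ≥ (sequence.length : Int) then st.2 + s - (sequence.length : Int)
         else st.2 + s))
      ([], 0)
    = ((List.range k).map
         (fun (j : Nat) => PySem.List.pyGetD sequence (((j : Int) * s) % (sequence.length : Int)) 0),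
       ((k : Int) * s) % (sequence.length : Int)) := by
  have hL : (0 : Int) < (sequence.length : Int) := lt_of_le_of_lt hs0 hsN
  induction k with
  | zero => simp
  | succ k ih =>
    rw [List.range_succ, List.foldl_append, ih, List.map_append]
    simp only [List.foldl_cons, List.foldl_nil, List.map_cons, List.map_nil, Prod.mk.injEq]
    refine ⟨trivial, ?_⟩
    set N : Int := (sequence.length : Int) with hNdef
    set i : Int := ((k : Int) * s) % N with hidef
    have hi0 : 0 ≤ i := Int.emod_nonneg _ (by omega)
    have hiN : i < N := Int.emod_lt_of_pos _ hL
    have hnext : ((k : Int) + 1) * s % N = (i + s) % N := by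
      have : ((k : Int) + 1) * s = (k : Int) * s + s := by ring
      rw [this, hidef]
      exact (Int.emod_add_emod ((k : Int) * s) N s).symm
    push_cast
    rw [hnext]
    by_cases hge : i + s ≥ N
    · rw [if_pos hge, ← Int.sub_emod_right (i + s) N]
      exact (Int.emod_eq_of_lt (by omega) (by omega)).symm
    · rw [if_neg hge]
      exact (Int.emod_eq_of_lt (by omega) (by omega)).symm

-- the hand-written Euclid loop computes Int.gcd on nonnegative inputs
theorem pyGcd_eq (a b : Int) (ha : 0 ≤ a) (hb : 0 ≤ b) : pyGcd a b = (Int.gcd a b : Int) := by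
  rw [pyGcd]
  by_cases h : b = 0
  · rw [dif_pos h, h]
    simp [Int.gcd, Int.natAbs_of_nonneg ha]
  · have hbpos : 0 < b := lt_of_le_of_ne hb (Ne.symm h)
    have h1 : 0 ≤ PySem.Int.mod a b := PySem.Int.mod_nonneg a hbpos
    have h2 : PySem.Int.mod a b < b := PySem.Int.mod_lt a hbpos
    rw [dif_neg h, pyGcd_eq b (PySem.Int.mod a b) hb h1]
    rw [PySem.Int.mod_eq_emod_of_pos hbpos]
    congr 1
    have hab : a % b = ((a.natAbs % b.natAbs : Nat) : Int) := by
      conv_lhs => rw [← Int.natAbs_of_nonneg ha, ← Int.natAbs_of_nonneg hb]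
      push_cast
      rfl
    rw [Int.gcd_def, Int.gcd_def, hab, Int.natAbs_natCast]
    rw [Nat.gcd_comm b.natAbs _, ← Nat.gcd_rec, Nat.gcd_comm]
termination_by b.natAbs
decreasing_by omega

-- tiling: a p-periodic map over range (g*p) is g copies of one period
theorem tile_periodic {α : Type} (f : Nat → α) (p : Nat) (h : ∀ j, f (j + p) = f j) :
    ∀ g : Nat, (List.range (g * p)).map f = (List.replicate g ((List.range p).map f)).flatten := by
  have hiter : ∀ (g j : Nat), f (j + g * p) = f j := by
    intro g
    induction g with
    | zero => intro j; simp
    | succ g ih =>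
      intro j
      have : j + (g + 1) * p = (j + g * p) + p := by ring
      rw [this, h, ih]
  intro g
  induction g with
  | zero => simp
  | succ g ih =>
    rw [Nat.succ_mul, List.range_add, List.map_append, ih, List.replicate_succ',
        List.flatten_append]
    congr 1
    have hc : [List.map f (List.range p)].flatten = List.map f (List.range p) := by simp
    rw [hc, List.map_map]
    apply List.map_congr_left
    intro x _
    simp only [Function.comp_apply]
    rw [Nat.add_comm]
    exact hiter g x

theorem decimate_spec : Claim_equal_decimate := by
  intro sequence step _
  unfold Spec_decimate decimate
  by_cases hne : sequence.length = 0
  · simp [decimate_alt, hne]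
  · have hseq : sequence ≠ [] := by
      intro h; exact hne (by simp [h])
    have hL : (0 : Int) < (sequence.length : Int) := by
      have : 0 < sequence.length := Nat.pos_of_ne_zero hne
      exact_mod_cast this
    rw [decimate_invariant sequence step hseq sequence.length]
    simp only [decimate_alt, if_neg hne]
    set N : Int := (sequence.length : Int) with hNdef
    set s : Int := PySem.Int.mod step N with hsdef
    have hsemod : s = step % N := by rw [hsdef, PySem.Int.mod_eq_emod_of_pos hL]
    have hs0 : 0 ≤ s := by rw [hsemod]; exact Int.emod_nonneg _ (by omega)
    have hsN : s < N := by rw [hsemod]; exact Int.emod_lt_of_pos _ hL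
    set g : Int := pyGcd s N with hgdef
    have hg : g = (Int.gcd s N : Int) := by rw [hgdef]; exact pyGcd_eq s N hs0 (le_of_lt hL)
    have hgpos : 0 < g := by
      rw [hg]
      have : Int.gcd s N ≠ 0 := by
        intro h0
        have := Int.eq_zero_of_gcd_eq_zero_right h0
        omega
      exact_mod_cast Nat.pos_of_ne_zero this
    have hgdvdN : g ∣ N := by rw [hg]; exact Int.gcd_dvd_right s N
    have hgdvds : g ∣ s := by rw [hg]; exact Int.gcd_dvd_left s N
    set p : Int := N / g with hpdef
    have hgp : g * p = N := by rw [hpdef]; exact Int.mul_ediv_cancel' hgdvdN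
    have hppos : 0 < p := by
      by_contra hc
      push Not at hc
      nlinarith
    have hfdiv : PySem.Int.floordiv N g = p := by
      rw [PySem.Int.floordiv_eq_ediv_of_pos hgpos, hpdef]
    obtain ⟨t, ht⟩ := hgdvds
    have hps : p * s = N * t := by
      calc p * s = p * (g * t) := by rw [← ht]
        _ = (g * p) * t := by ring
        _ = N * t := by rw [hgp]
    have hperiod : ∀ j : Nat,
        PySem.List.pyGetD sequence (((j + p.toNat : Nat) : Int) * s % N) 0
        = PySem.List.pyGetD sequence ((j : Int) * s % N) 0 := by
      intro j
      congr 1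
      have hpt : ((p.toNat : Int)) = p := Int.toNat_of_nonneg (le_of_lt hppos)
      push_cast
      rw [hpt]
      have hx : ((j : Int) + p) * s = (j : Int) * s + N * t := by
        rw [add_mul, hps]
      rw [hx, Int.add_mul_emod_self_left]
    have hlen : sequence.length = g.toNat * p.toNat := by
      have hgt : ((g.toNat : Int)) = g := Int.toNat_of_nonneg (le_of_lt hgpos)
      have hpt : ((p.toNat : Int)) = p := Int.toNat_of_nonneg (le_of_lt hppos)
      have hcast : ((g.toNat * p.toNat : Nat) : Int) = N := by push_cast; rw [hgt, hpt, hgp]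
      rw [hNdef] at hcast
      exact_mod_cast hcast.symm
    rw [hfdiv, decimate_alt_invariant sequence s hs0 hsN p.toNat]
    simp only
    rw [PySem.List.pyRepeat]
    rw [← tile_periodic (fun j => PySem.List.pyGetD sequence ((j : Int) * s % N) 0) p.toNat hperiod g.toNat]
    rw [← hlen]
    apply List.map_congr_left
    intro j _
    congr 1
    rw [hsemod]
    rw [Int.mul_emod (j : Int) step N, Int.mul_emod (j : Int) (step % N) N,
        Int.emod_emod_of_dvd step (dvd_refl N)]
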